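-- pv_equiv track=rewrite | github.com/pypi-data/pypi-mirror-404 | packages/unifi-network-maps/unifi_network_maps-1.4.15.tar.gz/unifi_network_maps-1.4.15/src/unifi_network_maps/model/lldp.py | _looks_like_mac
-- ===== SOURCE A (Python) =====
-- def _looks_like_mac(value: str | None) -> bool:
--     if not value:
--         return False
--     cleaned = value.strip().lower()
--     if cleaned.count(":") == 5:
--         return all(
--             len(part) == 2 and all(ch in "0123456789abcdef" for ch in part)
--             for part in cleaned.split(":")
--         )
--     return False
-- ===== SOURCE B (Python) =====
-- def _looks_like_mac(value):
--     if not value: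
--         return False
--     cleaned = value.strip().lower()
--     if len(cleaned) != 17:
--         return False
--     return all(c == ":" if i % 3 == 2 else c in "0123456789abcdef" for i, c in enumerate(cleaned))
-- ===== Notes on version B (the rewrite author's own statement) =====
-- stated objective: simpler
-- what changed: Replaces A's colon-count, split-on-colon and per-part length/hex checks by a single positional pass: length must be 17 and each character must be a colon at indices congruent to 2 mod 3 and a lowercase hex digit elsewhere.
import Mathlib
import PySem

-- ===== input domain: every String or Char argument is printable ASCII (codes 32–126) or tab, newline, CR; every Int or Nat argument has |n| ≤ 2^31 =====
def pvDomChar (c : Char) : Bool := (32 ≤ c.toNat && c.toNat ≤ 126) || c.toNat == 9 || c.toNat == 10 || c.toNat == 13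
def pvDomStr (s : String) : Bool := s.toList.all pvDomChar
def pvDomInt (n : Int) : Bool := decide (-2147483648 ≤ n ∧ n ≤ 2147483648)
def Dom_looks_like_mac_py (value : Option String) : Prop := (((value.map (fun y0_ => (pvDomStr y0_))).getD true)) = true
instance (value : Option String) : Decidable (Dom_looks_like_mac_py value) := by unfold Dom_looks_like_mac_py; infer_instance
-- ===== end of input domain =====

-- B replaces A's colon-count + split + per-part hex loop by a single positional pass
-- (length 17, a colon at every third position, lowercase hex digits elsewhere); objective: simpler.

-- shared by both ports: the membership test `ch in "0123456789abcdef"` both Pythons perform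
def pvHex (ch : Char) : Bool := PySem.Chars.isIn [ch] "0123456789abcdef".toList

-- ===== PORT A =====
def looks_like_mac_py (value : Option String) : Bool :=
  match value with
  | none => false
  | some s =>
    if s.toList.isEmpty then false          -- `if not value: return False` (None handled above)
    else
      let cleaned := PySem.Chars.lower (PySem.Chars.strip s.toList)
      if PySem.Chars.count cleaned [':'] = 5 then
        (PySem.Chars.splitOn cleaned [':']).all
          (fun part => decide (part.length = 2) && part.all (fun ch => pvHex ch))
      else false

-- ===== PORT B =====
def looks_like_mac_py_alt (value : Option String) : Bool :=
  match value with
  | none => false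
  | some s =>
    if s.toList.isEmpty then false
    else
      let cleaned := PySem.Chars.lower (PySem.Chars.strip s.toList)
      if PySem.Chars.len cleaned ≠ 17 then false
      else
        (PySem.List.enumerate cleaned 0).all
          (fun p => if PySem.Int.mod p.1 3 = 2 then p.2 == ':' else pvHex p.2)

-- ===== PRECONDITION & SPEC =====
def Spec_looks_like_mac_py (value : Option String) (out : Bool) : Prop := out = looks_like_mac_py_alt value
instance (value : Option String) (out : Bool) : Decidable (Spec_looks_like_mac_py value out) := by unfold Spec_looks_like_mac_py; infer_instance

-- ===== CLAIM (what is proved, stated in full; the proofs are below) =====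
def Claim_equal_looks_like_mac_py : Prop := ∀ (value : Option String), Dom_looks_like_mac_py value → Spec_looks_like_mac_py value (looks_like_mac_py value)

-- ===== LEMMAS AND PROOFS =====

-- A's per-part test
def pvPartOK (part : List Char) : Bool := decide (part.length = 2) && part.all (fun ch => pvHex ch)

-- structural model of splitOn.go for the single-char separator ':'
def pvAux : List Char → List Char → List (List Char)
  | [], cur => [cur.reverse]
  | c :: t, cur => if c = ':' then cur.reverse :: pvAux t [] else pvAux t (c :: cur)

-- canonical pattern: n+1 groups of two hex digits joined by ':'
def pvP : Nat → List Char → Bool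
  | 0, [a, b] => pvHex a && pvHex b
  | 0, _ => false
  | n + 1, a :: b :: c :: rest => pvHex a && pvHex b && decide (c = ':') && pvP n rest
  | _ + 1, _ => false

-- structural model of B's enumerate-all pass, carrying the index
def pvG (s : Int) : List Char → Bool
  | [] => true
  | c :: t => (if PySem.Int.mod s 3 = 2 then c == ':' else pvHex c) && pvG (s + 1) t

lemma pvCountGo (l : List Char) : ∀ (fuel acc : Nat), l.length ≤ fuel →
    PySem.Chars.count.go [':'] fuel l acc = acc + l.count ':' := by
  induction l with
  | nil => intro fuel acc _; rcases fuel with _ | f <;> simp [PySem.Chars.count.go]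
  | cons c t ih =>
    intro fuel acc h
    rcases fuel with _ | f
    · simp at h
    · show (if [':'].isPrefixOf (c :: t) then
          PySem.Chars.count.go [':'] f (List.drop 1 (c :: t)) (acc + 1)
        else PySem.Chars.count.go [':'] f t acc) = _
      simp only [List.length_cons] at h
      by_cases hc : c = ':'
      · subst hc
        simp [List.isPrefixOf, ih f (acc + 1) (by omega), List.count_cons]
        omega
      · simp [List.isPrefixOf, Ne.symm hc, ih f acc (by omega), List.count_cons, hc]

lemma pvCountEq (l : List Char) : PySem.Chars.count l [':'] = l.count ':' := by
  simpa [PySem.Chars.count] using pvCountGo l l.length 0 le_rfl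

lemma pvSplitGo (l : List Char) : ∀ (fuel : Nat) (cur : List Char) (acc : List (List Char)),
    l.length < fuel →
    PySem.Chars.splitOn.go [':'] fuel l cur acc = acc.reverse ++ pvAux l cur := by
  induction l with
  | nil =>
    intro fuel cur acc h
    rcases fuel with _ | f
    · simp at h
    · show (cur.reverse :: acc).reverse = _
      simp [pvAux]
  | cons c t ih =>
    intro fuel cur acc h
    rcases fuel with _ | f
    · simp at h
    · show (if [':'].isPrefixOf (c :: t) then
          PySem.Chars.splitOn.go [':'] f (List.drop 1 (c :: t)) [] (cur.reverse :: acc)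
        else PySem.Chars.splitOn.go [':'] f t (c :: cur) acc) = _
      simp only [List.length_cons] at h
      by_cases hc : c = ':'
      · subst hc
        simp [List.isPrefixOf, ih f [] (cur.reverse :: acc) (by omega), pvAux]
      · simp [List.isPrefixOf, Ne.symm hc, ih f (c :: cur) acc (by omega), pvAux, hc]

lemma pvSplitEq (l : List Char) : PySem.Chars.splitOn l [':'] = pvAux l [] := by
  simpa [PySem.Chars.splitOn] using pvSplitGo l (l.length + 1) [] [] (by omega)

-- once the current chunk has ≥ 3 chars, A's per-part check can never succeed
lemma pvAux_all_false (l : List Char) : ∀ cur : List Char, 3 ≤ cur.length →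
    (pvAux l cur).all pvPartOK = false := by
  induction l with
  | nil =>
    intro cur h
    have h2 : pvPartOK cur.reverse = false := by
      unfold pvPartOK
      rw [decide_eq_false (by rw [List.length_reverse]; omega), Bool.false_and]
    simp only [pvAux, List.all_cons, h2, Bool.false_and]
  | cons c t ih =>
    intro cur h
    by_cases hc : c = ':'
    · subst hc
      have h2 : pvPartOK cur.reverse = false := by
        unfold pvPartOK
        rw [decide_eq_false (by rw [List.length_reverse]; omega), Bool.false_and]
      simp only [pvAux, if_pos rfl, if_true, List.all_cons, h2, Bool.false_and]
    · simp only [pvAux, if_neg hc]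
      exact ih (c :: cur) (by simp; omega)

lemma pvP_not_hex_fst {a : Char} (ha : pvHex a = false) (t : List Char) (n : Nat) :
    pvP n (a :: t) = false := by
  rcases n with _ | n <;> rcases t with _ | ⟨b, _ | ⟨c, r⟩⟩ <;> simp [pvP, ha]

lemma pvP_not_hex_snd {b : Char} (hb : pvHex b = false) (a : Char) (t : List Char) (n : Nat) :
    pvP n (a :: b :: t) = false := by
  rcases n with _ | n <;> rcases t with _ | ⟨c, r⟩ <;> simp [pvP, hb]

lemma pvHex_colon : pvHex ':' = false := by decide

lemma pvPartOK_pair (a b : Char) : pvPartOK [a, b] = (pvHex a && pvHex b) := by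
  simp [pvPartOK]

-- A's check (count = n colons, all parts two hex digits) is the canonical pattern
lemma pvE1 : ∀ (N : Nat) (l : List Char), l.length ≤ N → ∀ n : Nat,
    (decide (l.count ':' = n) && (pvAux l []).all pvPartOK) = pvP n l := by
  intro N
  induction N with
  | zero =>
    intro l hl n
    have hnil : l = [] := by
      cases l with
      | nil => rfl
      | cons a t => simp at hl
    subst hnil
    rcases n with _ | n <;> rfl
  | succ N ih =>
    intro l hl n
    rcases l with _ | ⟨a, t⟩
    · rcases n with _ | n <;> rfl
    · by_cases hA : a = ':'
      · subst hA
        have hall : (pvAux (':' :: t) []).all pvPartOK = false := by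
          simp only [pvAux, if_pos rfl, if_true, List.all_cons,
            show pvPartOK ([] : List Char).reverse = false from rfl, Bool.false_and]
        rw [hall, Bool.and_false, pvP_not_hex_fst pvHex_colon]
      · rcases t with _ | ⟨b, t⟩
        · -- l = [a]
          have hall : (pvAux [a] []).all pvPartOK = false := by
            simp only [pvAux, if_neg hA]
            rw [List.all_cons, List.reverse_singleton,
              show pvPartOK ([a] : List Char) = false from rfl, Bool.false_and]
          have hp : pvP n [a] = false := by rcases n with _ | m <;> rfl
          rw [hall, Bool.and_false, hp]
        · by_cases hB : b = ':'
          · subst hB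
            have hall : (pvAux (a :: ':' :: t) []).all pvPartOK = false := by
              simp only [pvAux, if_neg hA, if_pos rfl, if_true, List.all_cons]
              rw [show ([a] : List Char).reverse = [a] from rfl,
                show pvPartOK ([a] : List Char) = false from rfl, Bool.false_and]
            rw [hall, Bool.and_false, pvP_not_hex_snd pvHex_colon]
          · rcases t with _ | ⟨c, rest⟩
            · -- l = [a, b]
              have hAux : pvAux [a, b] [] = [[a, b]] := by
                simp only [pvAux, if_neg hA, if_neg hB]
                rfl
              have hcnt : List.count ':' [a, b] = 0 := by
                simp [List.count_cons, hA, hB]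
              rw [hAux, hcnt, List.all_cons, List.all_nil, Bool.and_true, pvPartOK_pair]
              rcases n with _ | n
              · rw [show decide ((0 : Nat) = 0) = true from rfl, Bool.true_and]
                rfl
              · rw [decide_eq_false (by omega), Bool.false_and,
                  show pvP (n + 1) [a, b] = false from rfl]
            · by_cases hC : c = ':'
              · subst hC
                -- l = a :: b :: ':' :: rest, the recursive case
                have hAux : pvAux (a :: b :: ':' :: rest) [] = [a, b] :: pvAux rest [] := by
                  simp only [pvAux, if_neg hA, if_neg hB, if_pos rfl, if_true]
                  rfl
                have hcnt : List.count ':' (a :: b :: ':' :: rest) = List.count ':' rest + 1 := by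
                  simp [List.count_cons, hA, hB]
                rw [hAux, hcnt, List.all_cons, pvPartOK_pair]
                rcases n with _ | n
                · rw [decide_eq_false (by omega), Bool.false_and,
                    show pvP 0 (a :: b :: ':' :: rest) = false from rfl]
                · have hrec := ih rest (by simp at hl ⊢; omega) n
                  rw [show pvP (n + 1) (a :: b :: ':' :: rest)
                      = (pvHex a && pvHex b && decide ((':' : Char) = ':') && pvP n rest) from rfl,
                    ← hrec, decide_eq_true (rfl : (':' : Char) = ':')]
                  cases pvHex a <;> cases pvHex b <;>
                    cases hrest : (pvAux rest []).all pvPartOK <;>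
                      simp <;> omega
              · -- third char not ':' : first part too long on the A side
                have hall : (pvAux (a :: b :: c :: rest) []).all pvPartOK = false := by
                  simp only [pvAux, if_neg hA, if_neg hB, if_neg hC]
                  exact pvAux_all_false rest [c, b, a] (by simp)
                have hp : pvP n (a :: b :: c :: rest) = false := by
                  rcases n with _ | n
                  · rfl
                  · simp [pvP, hC]
                rw [hall, Bool.and_false, hp]

-- bridge: B's enumerate-all pass is pvG
lemma pvEnumAll (l : List Char) : ∀ s : Int,
    (PySem.List.enumerate l s).all
      (fun p => if PySem.Int.mod p.1 3 = 2 then p.2 == ':' else pvHex p.2) = pvG s l := by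
  induction l with
  | nil => intro s; rfl
  | cons c t ih =>
    intro s
    rw [PySem.List.enumerate_cons, List.all_cons, ih (s + 1)]
    rfl

lemma pvModAdd3 (s : Int) : PySem.Int.mod (s + 3) 3 = PySem.Int.mod s 3 := by
  rw [PySem.Int.mod_eq_emod_of_pos (show (0 : Int) < 3 by omega),
    PySem.Int.mod_eq_emod_of_pos (show (0 : Int) < 3 by omega)]
  omega

lemma pvG_shift (l : List Char) : ∀ s : Int, pvG (s + 3) l = pvG s l := by
  induction l with
  | nil => intro s; rfl
  | cons c t ih =>
    intro s
    rw [show pvG (s + 3) (c :: t)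
        = ((if PySem.Int.mod (s + 3) 3 = 2 then c == ':' else pvHex c) && pvG (s + 3 + 1) t) from rfl,
      pvModAdd3, show s + 3 + 1 = s + 1 + 3 from by ring, ih (s + 1)]
    rfl

-- B's check (length 3n+2, positional pass) is the canonical pattern
lemma pvE2 : ∀ (N : Nat) (l : List Char), l.length ≤ N → ∀ n : Nat,
    (decide (l.length = 3 * n + 2) && pvG 0 l) = pvP n l := by
  intro N
  induction N with
  | zero =>
    intro l hl n
    have hnil : l = [] := by
      cases l with
      | nil => rfl
      | cons a t => simp at hl
    subst hnil
    rw [decide_eq_false (by simp only [List.length_cons, List.length_nil]; omega), Bool.false_and]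
    rcases n with _ | n <;> rfl
  | succ N ih =>
    intro l hl n
    rcases l with _ | ⟨a, _ | ⟨b, _ | ⟨c, rest⟩⟩⟩
    · rw [decide_eq_false (by simp only [List.length_cons, List.length_nil]; omega), Bool.false_and]
      rcases n with _ | n <;> rfl
    · rw [decide_eq_false (by simp only [List.length_cons, List.length_nil]; omega), Bool.false_and]
      rcases n with _ | n <;> rfl
    · -- l = [a, b]
      have hg : pvG 0 [a, b] = (pvHex a && (pvHex b && true)) := rfl
      rcases n with _ | n
      · rw [hg, show decide (List.length [a, b] = 3 * 0 + 2) = true from rfl, Bool.true_and,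
          Bool.and_true, show pvP 0 [a, b] = (pvHex a && pvHex b) from rfl]
      · rw [decide_eq_false (by simp only [List.length_cons, List.length_nil]; omega), Bool.false_and,
          show pvP (n + 1) [a, b] = false from rfl]
    · -- l = a :: b :: c :: rest
      have hg : pvG 0 (a :: b :: c :: rest)
          = (pvHex a && (pvHex b && ((c == ':') && pvG 3 rest))) := rfl
      rw [hg, show (3 : Int) = 0 + 3 from rfl, pvG_shift]
      by_cases hC : c = ':'
      · subst hC
        rcases n with _ | n
        · rw [decide_eq_false (by simp only [List.length_cons, List.length_nil]; omega), Bool.false_and,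
            show pvP 0 (a :: b :: ':' :: rest) = false from rfl]
        · have hrec := ih rest (by simp at hl ⊢; omega) n
          have hlen : decide (List.length (a :: b :: ':' :: rest) = 3 * (n + 1) + 2)
              = decide (List.length rest = 3 * n + 2) := by
            simp only [List.length_cons]
            by_cases h : rest.length = 3 * n + 2
            · rw [decide_eq_true h, decide_eq_true (by omega)]
            · rw [decide_eq_false h, decide_eq_false (by omega)]
          rw [hlen, show pvP (n + 1) (a :: b :: ':' :: rest)
              = (pvHex a && pvHex b && decide ((':' : Char) = ':') && pvP n rest) from rfl,
            ← hrec, decide_eq_true (rfl : (':' : Char) = ':'),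
            show ((':' : Char) == ':') = true from rfl]
          cases pvHex a <;> cases pvHex b <;> cases pvG 0 rest <;> simp
      · have hbeq : (c == ':') = false := by simp [hC]
        have hp : pvP n (a :: b :: c :: rest) = false := by
          rcases n with _ | n
          · rfl
          · simp [pvP, hC]
        rw [hbeq, hp, Bool.false_and, Bool.and_false, Bool.and_false, Bool.and_false]

-- the core: A's branch on cleaned equals B's branch on cleaned
lemma pvCore (cl : List Char) :
    (if PySem.Chars.count cl [':'] = 5 then
        (PySem.Chars.splitOn cl [':']).all (fun part => decide (part.length = 2) && part.all (fun ch => pvHex ch))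
      else false)
    = (if PySem.Chars.len cl ≠ 17 then false
       else (PySem.List.enumerate cl 0).all
         (fun p => if PySem.Int.mod p.1 3 = 2 then p.2 == ':' else pvHex p.2)) := by
  rw [pvCountEq, pvSplitEq, pvEnumAll,
    show (fun part : List Char => decide (part.length = 2) && part.all fun ch => pvHex ch)
      = pvPartOK from rfl]
  have e1 := pvE1 cl.length cl le_rfl 5
  have e2 := pvE2 cl.length cl le_rfl 5
  have hlen : PySem.Chars.len cl = (cl.length : Int) := by simp
  by_cases h5 : cl.count ':' = 5
  · by_cases h17 : cl.length = 17
    · rw [if_pos h5, if_neg (by rw [hlen]; omega)]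
      rw [show (pvAux cl []).all pvPartOK = pvP 5 cl by simpa [h5] using e1]
      rw [show pvG 0 cl = pvP 5 cl by simpa [h17] using e2]
    · rw [if_pos h5, if_pos (by rw [hlen]; omega)]
      rw [show (pvAux cl []).all pvPartOK = pvP 5 cl by simpa [h5] using e1]
      rw [← e2]
      simp [h17]
  · rw [if_neg h5]
    have hP : pvP 5 cl = false := by
      rw [← e1]; simp [h5]
    by_cases h17 : cl.length = 17
    · rw [if_neg (by rw [hlen]; omega)]
      rw [show pvG 0 cl = pvP 5 cl by simpa [h17] using e2, hP]
    · rw [if_pos (by rw [hlen]; omega)]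

-- ===== VERDICT (by name: the statement is the Claim_ definition above) =====
theorem looks_like_mac_py_spec : Claim_equal_looks_like_mac_py := by
  intro value _
  unfold Spec_looks_like_mac_py looks_like_mac_py looks_like_mac_py_alt
  rcases value with _ | s
  · rfl
  · rcases h : s.toList.isEmpty with _ | _
    · simp only [h, Bool.false_eq_true, if_false]
      exact pvCore (PySem.Chars.lower (PySem.Chars.strip s.toList))
    · simp [h]
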